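-- pv_equiv track=rewrite | github.com/Penitto/go_documentation | go_template/generator.py | _is_field_key
-- ===== SOURCE A (Python) =====
-- def _is_field_key(source: str, end_idx: int) -> bool:
--     i = end_idx
--     length = len(source)
--     while i < length and source[i].isspace():
--         i += 1
--     if i < length and source[i] == ":":
--         if i + 1 < length and source[i + 1] == "=":
--             return False
--         return True
--     return False
-- ===== SOURCE B (Python) =====
-- def _is_field_key(source: str, end_idx: int) -> bool:
--     rest = source[end_idx:].lstrip()
--     return rest.startswith(":") and not rest.startswith(":=")
-- ===== Notes on version B (the rewrite author's own statement) =====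
-- stated objective: simpler
-- what changed: Replaces the index-advancing whitespace loop and positional colon/equals checks with a single slice-plus-lstrip and two startswith predicates on the stripped remainder.
-- intended difference: For -len(source) <= end_idx < 0, Python's negative-index wraparound makes A's whitespace scan restart at the front of the string when the suffix is all whitespace (returning the front-scan answer) and makes its ':=' lookahead read source[0] when the colon is the last character; B uses the intended suffix semantics of source[end_idx:], which is what an index-into-the-source parameter means. — e.g. on _is_field_key(": ", -1): A returns true, B returns false
import Mathlib
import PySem

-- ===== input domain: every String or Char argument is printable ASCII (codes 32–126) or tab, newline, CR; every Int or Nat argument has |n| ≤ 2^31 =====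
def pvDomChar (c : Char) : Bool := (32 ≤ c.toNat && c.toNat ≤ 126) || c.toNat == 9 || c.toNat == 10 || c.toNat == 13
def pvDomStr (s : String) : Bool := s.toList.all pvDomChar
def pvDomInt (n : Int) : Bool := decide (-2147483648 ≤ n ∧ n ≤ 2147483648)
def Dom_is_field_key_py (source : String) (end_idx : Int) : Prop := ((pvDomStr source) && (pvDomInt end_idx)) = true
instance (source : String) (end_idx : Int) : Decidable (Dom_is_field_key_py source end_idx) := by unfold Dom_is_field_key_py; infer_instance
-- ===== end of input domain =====

-- B replaces A's index-advancing whitespace loop and positional colon/equals checks by one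
-- slice-plus-lstrip and two startswith predicates (objective: simpler). Return value only; neither mutates.

-- ===== PORT A =====
-- the 'while i < length and source[i].isspace(): i += 1' loop of A; the fuel (length - i)
-- is an upper bound on the remaining iterations, never consulted otherwise;
-- pyGet? = none is Python's IndexError (those inputs are outside Pre_)
def pvSkipWsGo (s : List Char) : Nat → Int → Int
  | 0, i => i
  | fuel + 1, i =>
    if i < (s.length : Int) then
      match PySem.List.pyGet? s i with
      | some c => if PySem.Chars.isspace c then pvSkipWsGo s fuel (i + 1) else i
      | none => i
    else i

def pvSkipWs (s : List Char) (i : Int) : Int :=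
  pvSkipWsGo s ((s.length : Int) - i).toNat i

-- the trailing 'if i < length and source[i] == ":" …' checks of A, at the index the loop stopped at
def pvCheck (s : List Char) (i : Int) : Bool :=
  if i < (s.length : Int) then
    match PySem.List.pyGet? s i with
    | some c =>
      if c = ':' then
        if i + 1 < (s.length : Int) then
          match PySem.List.pyGet? s (i + 1) with
          | some d => if d = '=' then false else true
          | none => true
        else true
      else false
    | none => false
  else false

def is_field_key_py (source : String) (end_idx : Int) : Bool :=
  pvCheck source.toList (pvSkipWs source.toList end_idx)

-- ===== PORT B =====
def is_field_key_py_alt (source : String) (end_idx : Int) : Bool :=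
  let rest := PySem.Str.lstrip (PySem.Str.slice source (some end_idx) none)
  PySem.Str.startswith rest ":" && !(PySem.Str.startswith rest ":=")

-- ===== PRECONDITION & SPEC =====
-- Pre_ excludes exactly the inputs where A raises IndexError: end_idx below -len(source)
-- (for the empty string that is every negative end_idx).
def Pre_is_field_key_py (source : String) (end_idx : Int) : Prop :=
  -(source.toList.length : Int) ≤ end_idx
instance (source : String) (end_idx : Int) : Decidable (Pre_is_field_key_py source end_idx) := by
  unfold Pre_is_field_key_py; infer_instance

def pvWitness_is_field_key_py : String × Int := (" : a", 0)

-- For -len(source) ≤ end_idx < 0, Python's negative-index wraparound makes A's whitespace scan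
-- restart at the front of the string when the suffix source[end_idx:] is all whitespace (A returns
-- the front-scan answer, B returns False for the empty stripped suffix) and makes A's ':=' lookahead
-- read source[0] when the colon is the last character (A returns False if source[0] == '=', B True);
-- B's suffix reading of source[end_idx:] is the intended meaning of the index parameter.
def D_is_field_key_py (source : String) (end_idx : Int) : Prop :=
  -(source.toList.length : Int) ≤ end_idx ∧ end_idx < 0 ∧
    ((((source.toList.drop ((source.toList.length : Int) + end_idx).toNat).dropWhile PySem.Chars.isspace = []) ∧
        ((source.toList.dropWhile PySem.Chars.isspace).head? = some ':' ∧
          (source.toList.dropWhile PySem.Chars.isspace)[1]? ≠ some '='))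
      ∨ ((source.toList.drop ((source.toList.length : Int) + end_idx).toNat).dropWhile PySem.Chars.isspace = [':'] ∧
          source.toList.head? = some '='))
instance (source : String) (end_idx : Int) : Decidable (D_is_field_key_py source end_idx) := by
  unfold D_is_field_key_py; infer_instance

def Spec_is_field_key_py (source : String) (end_idx : Int) (out : Bool) : Prop :=
  ¬ D_is_field_key_py source end_idx → out = is_field_key_py_alt source end_idx
instance (source : String) (end_idx : Int) (out : Bool) : Decidable (Spec_is_field_key_py source end_idx out) := by
  unfold Spec_is_field_key_py; infer_instance

def pvDiffWitness_is_field_key_py : String × Int := (": ", -1)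
def pvDiffWitnessOut_is_field_key_py : Bool × Bool := (true, false)

-- ===== CLAIM (what is proved, stated in full; the proofs are below) =====
def Claim_unchanged_is_field_key_py : Prop := ∀ (source : String) (end_idx : Int), Dom_is_field_key_py source end_idx → Pre_is_field_key_py source end_idx → Spec_is_field_key_py source end_idx (is_field_key_py source end_idx)
def Claim_changed_is_field_key_py : Prop := Dom_is_field_key_py (pvDiffWitness_is_field_key_py.1) (pvDiffWitness_is_field_key_py.2) ∧ Pre_is_field_key_py (pvDiffWitness_is_field_key_py.1) (pvDiffWitness_is_field_key_py.2) ∧ D_is_field_key_py (pvDiffWitness_is_field_key_py.1) (pvDiffWitness_is_field_key_py.2) ∧ is_field_key_py (pvDiffWitness_is_field_key_py.1) (pvDiffWitness_is_field_key_py.2) = pvDiffWitnessOut_is_field_key_py.1 ∧ is_field_key_py_alt (pvDiffWitness_is_field_key_py.1) (pvDiffWitness_is_field_key_py.2) = pvDiffWitnessOut_is_field_key_py.2 ∧ pvDiffWitnessOut_is_field_key_py.1 ≠ pvDiffWitnessOut_is_field_key_py.2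
def Claim_exact_is_field_key_py : Prop := ∀ (source : String) (end_idx : Int), Dom_is_field_key_py source end_idx → Pre_is_field_key_py source end_idx → D_is_field_key_py source end_idx → is_field_key_py source end_idx ≠ is_field_key_py_alt source end_idx

-- ===== LEMMAS AND PROOFS =====

-- the colon test B performs on the stripped remainder, as a function of the dropped prefix length
def pvKeyOf (l : List Char) : Bool :=
  let w := l.dropWhile PySem.Chars.isspace
  decide (w.head? = some ':') && !decide (w[1]? = some '=')

theorem pvSkipWs_unfold (s : List Char) (i : Int) :
    pvSkipWs s i =
      (if i < (s.length : Int) then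
        match PySem.List.pyGet? s i with
        | some c => if PySem.Chars.isspace c then pvSkipWs s (i + 1) else i
        | none => i
      else i) := by
  unfold pvSkipWs
  by_cases h : i < (s.length : Int)
  · have h2 : ((s.length : Int) - i).toNat = ((s.length : Int) - (i + 1)).toNat + 1 := by omega
    rw [h2]; simp only [pvSkipWsGo, h, if_true]
  · have h2 : ((s.length : Int) - i).toNat = 0 := by omega
    rw [h2]; simp [pvSkipWsGo, h]

theorem pv_startswith_keyOf (l : List Char) :
    (PySem.Chars.startswith l [':'] && !(PySem.Chars.startswith l [':', '='])) =
      (decide (l.head? = some ':') && !decide (l[1]? = some '=')) := by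
  match l with
  | [] => decide
  | [c] =>
    by_cases h : ':' = c
    · subst h; simp [PySem.Chars.startswith, List.isPrefixOf]
    · have h' : ¬c = ':' := fun e => h e.symm
      simp [PySem.Chars.startswith, List.isPrefixOf, h, h']
  | c :: d :: t =>
    by_cases h : ':' = c
    · subst h
      by_cases h2 : '=' = d
      · subst h2; simp [PySem.Chars.startswith, List.isPrefixOf]
      · have h2' : ¬d = '=' := fun e => h2 e.symm
        simp [PySem.Chars.startswith, List.isPrefixOf, h2, h2']
    · have h' : ¬c = ':' := fun e => h e.symm
      simp [PySem.Chars.startswith, List.isPrefixOf, h, h']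

theorem pv_alt_eq (source : String) (end_idx : Int) :
    is_field_key_py_alt source end_idx =
      pvKeyOf (source.toList.drop (PySem.List.clampIdx source.toList.length end_idx)) := by
  unfold is_field_key_py_alt pvKeyOf
  have hl : (PySem.Str.lstrip (PySem.Str.slice source (some end_idx) none)).toList
      = (source.toList.drop (PySem.List.clampIdx source.toList.length end_idx)).dropWhile PySem.Chars.isspace := by
    simp [PySem.Str.toList_lstrip, PySem.Chars.lstrip, PySem.List.slice_some_none]
  have h1 : ∀ r : String, PySem.Str.startswith r ":" = PySem.Chars.startswith r.toList [':'] := by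
    intro r; rw [PySem.Str.startswith_eq]; congr 1
  have h2 : ∀ r : String, PySem.Str.startswith r ":=" = PySem.Chars.startswith r.toList [':', '='] := by
    intro r; rw [PySem.Str.startswith_eq]; congr 1
  simp only [h1, h2, hl, pv_startswith_keyOf]

theorem pv_skip_nonneg (s : List Char) (k : Nat) :
    pvSkipWs s (k : Int) = ((k + ((s.drop k).takeWhile PySem.Chars.isspace).length : Nat) : Int) := by
  by_cases h : k < s.length
  · rw [pvSkipWs_unfold]
    have hg : PySem.List.pyGet? s (k : Int) = some s[k] := PySem.List.pyGet?_ofNat s k h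
    have hd : s.drop k = s[k] :: s.drop (k + 1) := List.drop_eq_getElem_cons h
    by_cases hsp : PySem.Chars.isspace s[k]
    · have := pv_skip_nonneg s (k + 1)
      simp only [hg, hsp, hd, List.takeWhile_cons, if_true]
      rw [show ((k : Int) + 1) = ((k + 1 : Nat) : Int) by push_cast; ring, this]
      simp [hsp]
      omega
    · simp only [hg, hd, List.takeWhile_cons, hsp]
      simp [if_pos (by exact_mod_cast h : (k : Int) < (s.length : Int))]
  · rw [pvSkipWs_unfold]
    have hd : s.drop k = [] := List.drop_eq_nil_of_le (by omega)
    rw [if_neg (by exact_mod_cast h : ¬ ((k : Int) < (s.length : Int)))]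
    simp [hd]
termination_by s.length - k
decreasing_by omega

theorem pv_check_nonneg (s : List Char) (k : Nat) :
    pvCheck s (k : Int) =
      (decide ((s.drop k).head? = some ':') && !decide ((s.drop k)[1]? = some '=')) := by
  unfold pvCheck
  by_cases h : k < s.length
  · have hg : PySem.List.pyGet? s (k : Int) = some s[k] := PySem.List.pyGet?_ofNat s k h
    have hd : s.drop k = s[k] :: s.drop (k + 1) := List.drop_eq_getElem_cons h
    rw [if_pos (by exact_mod_cast h)]
    by_cases hc : s[k] = ':'
    · by_cases h1 : k + 1 < s.length
      · have hg1 : PySem.List.pyGet? s ((k : Int) + 1) = some s[k+1] := by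
          rw [show ((k : Int) + 1) = ((k + 1 : Nat) : Int) by push_cast; ring]
          exact PySem.List.pyGet?_ofNat s (k+1) h1
        have hd1 : s.drop (k + 1) = s[k+1] :: s.drop (k + 2) := List.drop_eq_getElem_cons h1
        rw [hg, hd, hd1, if_pos (by exact_mod_cast h1 : (k:Int)+1 < (s.length:Int))]
        by_cases he : s[k+1] = '='
        · simp [hg1, hc, he]
        · simp [hg1, hc, he, List.getElem?_eq_getElem h1]
      · have hd1 : s.drop (k + 1) = [] := List.drop_eq_nil_of_le (by omega)
        rw [hg, hd, hd1, if_neg (by exact_mod_cast h1 : ¬ ((k:Int)+1 < (s.length:Int)))]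
        simp [hc]
    · rw [hg, hd]
      simp [hc, List.getElem?_eq_getElem h]
  · have hd : s.drop k = [] := List.drop_eq_nil_of_le (by omega)
    rw [if_neg (by exact_mod_cast h : ¬ ((k : Int) < (s.length : Int)))]
    simp [hd]

theorem pv_drop_takeWhile (p : Char → Bool) (l : List Char) :
    l.drop (l.takeWhile p).length = l.dropWhile p := by
  induction l with
  | nil => rfl
  | cons a t ih =>
    by_cases h : p a <;> simp [List.takeWhile, List.dropWhile, h, ih]

theorem pv_A_nonneg (s : List Char) (k : Nat) :
    pvCheck s (pvSkipWs s (k : Int)) = pvKeyOf (s.drop k) := by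
  rw [pv_skip_nonneg, pv_check_nonneg, pvKeyOf]
  have hdd : (s.drop k).drop ((s.drop k).takeWhile PySem.Chars.isspace).length
      = s.drop (k + ((s.drop k).takeWhile PySem.Chars.isspace).length) := by
    rw [List.drop_drop]
  rw [← hdd, pv_drop_takeWhile]

theorem pv_skip_neg (s : List Char) (k : Nat) (hk : 0 < k) (hn : k ≤ s.length) :
    pvSkipWs s (-(k : Int)) =
      (if (s.drop (s.length - k)).dropWhile PySem.Chars.isspace = [] then pvSkipWs s 0
       else -(k : Int) + (((s.drop (s.length - k)).takeWhile PySem.Chars.isspace).length : Int)) := by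
  rw [pvSkipWs_unfold]
  have hlt : -(k : Int) < (s.length : Int) := by omega
  have hidx : s.length - k < s.length := by omega
  have hg : PySem.List.pyGet? s (-(k : Int)) = some s[s.length - k] := by
    rw [PySem.List.pyGet?_neg_natCast s k hk hn]
    exact List.getElem?_eq_getElem hidx
  have hd : s.drop (s.length - k) = s[s.length - k] :: s.drop (s.length - k + 1) :=
    List.drop_eq_getElem_cons hidx
  rw [if_pos hlt, hg]
  by_cases hsp : PySem.Chars.isspace s[s.length - k]
  · simp only [hsp, if_true]
    by_cases h1 : k = 1
    · subst h1
      rw [show (-((1 : Nat) : Int) + 1) = ((0 : Nat) : Int) by omega]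
      rw [hd]
      simp [hsp, List.dropWhile_cons, List.drop_eq_nil_of_le (by omega : s.length ≤ s.length - 1 + 1)]
    · have hk1 : 0 < k - 1 := by omega
      have hn1 : k - 1 ≤ s.length := by omega
      have : (-(k : Int) + 1) = -((k - 1 : Nat) : Int) := by omega
      rw [this, pv_skip_neg s (k - 1) hk1 hn1]
      have hdrop : s.length - (k - 1) = s.length - k + 1 := by omega
      rw [hdrop, hd]
      simp only [List.dropWhile_cons, List.takeWhile_cons, hsp, if_true]
      split_ifs with hnil
      · rfl
      · simp; omega
  · simp only [hsp, if_false]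
    rw [hd]
    simp only [List.dropWhile_cons, List.takeWhile_cons, hsp, Bool.false_eq_true, if_false]
    simp only [reduceCtorEq, if_false]
    simp

theorem pv_check_neg (s : List Char) (j : Nat) (hj : 0 < j) (hn : j ≤ s.length) :
    pvCheck s (-(j : Int)) =
      (if j = 1 then decide (s[s.length - 1]? = some ':') && !decide (s[0]? = some '=')
       else decide (s[s.length - j]? = some ':') && !decide (s[s.length - j + 1]? = some '=')) := by
  unfold pvCheck
  have hidx : s.length - j < s.length := by omega
  have hg : PySem.List.pyGet? s (-(j : Int)) = some s[s.length - j] := by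
    rw [PySem.List.pyGet?_neg_natCast s j hj hn]
    exact List.getElem?_eq_getElem hidx
  rw [if_pos (by omega : -(j : Int) < (s.length : Int)), hg]
  by_cases h1 : j = 1
  · subst h1
    rw [if_pos (show -((1 : Nat) : Int) + 1 < (s.length : Int) by omega)]
    rw [show (-((1 : Nat) : Int) + 1) = ((0 : Nat) : Int) by omega, PySem.List.pyGet?_natCast]
    by_cases hc : s[s.length - 1] = ':'
    · cases h0 : s[0]? with
      | none => simp [hc, List.getElem?_eq_getElem hidx]
      | some d =>
        by_cases he : d = '='
        · simp [hc, he, h0, List.getElem?_eq_getElem hidx]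
        · simp [hc, he, h0, List.getElem?_eq_getElem hidx]
    · simp [hc, List.getElem?_eq_getElem hidx]
  · have hj2 : 2 ≤ j := by omega
    have : (-(j : Int) + 1) = -((j - 1 : Nat) : Int) := by omega
    rw [if_pos (by omega : -(j : Int) + 1 < (s.length : Int)), this]
    have hidx1 : s.length - (j - 1) < s.length := by omega
    have hg1 : PySem.List.pyGet? s (-((j - 1 : Nat) : Int)) = some s[s.length - (j - 1)] := by
      rw [PySem.List.pyGet?_neg_natCast s (j-1) (by omega : 0 < j - 1) (by omega : j - 1 ≤ s.length)]
      exact List.getElem?_eq_getElem hidx1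
    rw [hg1]
    have harith : s.length - (j - 1) = s.length - j + 1 := by omega
    by_cases hc : s[s.length - j] = ':'
    · by_cases he : s[s.length - (j - 1)] = '='
      · simp [hc, he, h1, List.getElem?_eq_getElem hidx, List.getElem?_eq_getElem hidx1, ← harith]
      · simp [hc, he, h1, List.getElem?_eq_getElem hidx, List.getElem?_eq_getElem hidx1, ← harith]
    · simp [hc, h1, List.getElem?_eq_getElem hidx]

theorem pv_drop_clamp (s : List Char) (e : Int) (h : 0 ≤ e) :
    s.drop (PySem.List.clampIdx s.length e) = s.drop e.toNat := by
  have h1 := PySem.List.slice_some_none (xs := s) (a := e)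
  have h2 := PySem.List.slice_from (xs := s) h
  rw [h1] at h2
  exact h2

-- the complete characterisation of port A on Pre_: front scan for 0 ≤ e, wraparound cases for e < 0
theorem pv_A_neg (s : List Char) (k : Nat) (hk : 0 < k) (hn : k ≤ s.length) :
    pvCheck s (pvSkipWs s (-(k : Int))) =
      (if (s.drop (s.length - k)).dropWhile PySem.Chars.isspace = [] then pvKeyOf s
       else if ((s.drop (s.length - k)).dropWhile PySem.Chars.isspace).length = 1 then
         decide (s[s.length - 1]? = some ':') && !decide (s[0]? = some '=')
       else
         decide (((s.drop (s.length - k)).dropWhile PySem.Chars.isspace).head? = some ':') &&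
           !decide (((s.drop (s.length - k)).dropWhile PySem.Chars.isspace)[1]? = some '=')) := by
  rw [pv_skip_neg s k hk hn]
  split_ifs with hnil hone
  · rw [show ((0 : Int)) = ((0 : Nat) : Int) by norm_num, pv_A_nonneg]
    rw [List.drop_zero]
  · -- loop stopped at a negative index; set m = skipped whitespace, j = k - m
    have hm : ((s.drop (s.length - k)).takeWhile PySem.Chars.isspace).length < (s.drop (s.length - k)).length := by
      rcases Nat.lt_or_ge ((s.drop (s.length - k)).takeWhile PySem.Chars.isspace).length (s.drop (s.length - k)).length with h | h
      · exact h
      · exfalso; apply hnil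
        rw [← pv_drop_takeWhile PySem.Chars.isspace]
        exact List.drop_eq_nil_of_le h
    have hlen : (s.drop (s.length - k)).length = k := by
      rw [List.length_drop]; omega
    set m := ((s.drop (s.length - k)).takeWhile PySem.Chars.isspace).length with hm_def
    have hmk : m < k := by omega
    have heq : (-(k : Int) + (m : Int)) = -(((k - m : Nat)) : Int) := by omega
    rw [heq, pv_check_neg s (k - m) (by omega) (by omega)]
    have hdw : (s.drop (s.length - k)).dropWhile PySem.Chars.isspace = s.drop (s.length - (k - m)) := by
      rw [← pv_drop_takeWhile PySem.Chars.isspace, List.drop_drop, ← hm_def]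
      congr 1; omega
    have hlendw : ((s.drop (s.length - k)).dropWhile PySem.Chars.isspace).length = k - m := by
      rw [hdw, List.length_drop]; omega
    have hj1 : k - m = 1 := by omega
    rw [if_pos hj1]
  · have hm : ((s.drop (s.length - k)).takeWhile PySem.Chars.isspace).length < (s.drop (s.length - k)).length := by
      rcases Nat.lt_or_ge ((s.drop (s.length - k)).takeWhile PySem.Chars.isspace).length (s.drop (s.length - k)).length with h | h
      · exact h
      · exfalso; apply hnil
        rw [← pv_drop_takeWhile PySem.Chars.isspace]
        exact List.drop_eq_nil_of_le h
    have hlen : (s.drop (s.length - k)).length = k := by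
      rw [List.length_drop]; omega
    set m := ((s.drop (s.length - k)).takeWhile PySem.Chars.isspace).length with hm_def
    have hmk : m < k := by omega
    have heq : (-(k : Int) + (m : Int)) = -(((k - m : Nat)) : Int) := by omega
    rw [heq, pv_check_neg s (k - m) (by omega) (by omega)]
    have hdw : (s.drop (s.length - k)).dropWhile PySem.Chars.isspace = s.drop (s.length - (k - m)) := by
      rw [← pv_drop_takeWhile PySem.Chars.isspace, List.drop_drop, ← hm_def]
      congr 1; omega
    have hlendw : ((s.drop (s.length - k)).dropWhile PySem.Chars.isspace).length = k - m := by
      rw [hdw, List.length_drop]; omega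
    have hj1 : k - m ≠ 1 := by omega
    rw [if_neg hj1, hdw]
    have hh : (s.drop (s.length - (k - m))).head? = s[s.length - (k - m)]? := by
      rw [List.head?_drop]
    have hh1 : (s.drop (s.length - (k - m)))[1]? = s[s.length - (k - m) + 1]? := by
      rw [List.getElem?_drop]
    rw [hh, hh1]

-- A and B on a negative in-range index, as one case split over the stripped suffix
theorem pv_neg_cases (s : List Char) (k : Nat) (hk : 0 < k) (hn : k ≤ s.length) :
    ((s.drop (s.length - k)).dropWhile PySem.Chars.isspace ≠ [] →
      ((s.drop (s.length - k)).dropWhile PySem.Chars.isspace).length = 1 →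
      (s.drop (s.length - k)).dropWhile PySem.Chars.isspace = s.drop (s.length - 1)) := by
  intro hnil hone
  have hdt : (s.drop (s.length - k)).dropWhile PySem.Chars.isspace
      = s.drop (((s.drop (s.length - k)).takeWhile PySem.Chars.isspace).length + (s.length - k)) := by
    rw [← pv_drop_takeWhile, List.drop_drop]
    congr 1
    omega
  have hlen : ((s.drop (s.length - k)).dropWhile PySem.Chars.isspace).length
      = s.length - (((s.drop (s.length - k)).takeWhile PySem.Chars.isspace).length + (s.length - k)) := by
    rw [hdt, List.length_drop]
  rw [hone] at hlen
  have hle : ((s.drop (s.length - k)).takeWhile PySem.Chars.isspace).length + (s.length - k) = s.length - 1 := by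
    omega
  rw [hdt, hle]

-- ===== VERDICT (by name: the statement is the Claim_ definition above) =====
theorem is_field_key_py_spec : Claim_unchanged_is_field_key_py := by
  intro source end_idx _ hpre hnD
  unfold Pre_is_field_key_py at hpre
  unfold D_is_field_key_py at hnD
  unfold is_field_key_py
  rw [pv_alt_eq]
  by_cases hge : 0 ≤ end_idx
  · rw [pv_drop_clamp _ _ hge]
    rw [show end_idx = ((end_idx.toNat : Nat) : Int) by omega]
    exact pv_A_nonneg _ _
  · have hlt : end_idx < 0 := by omega
    set s : List Char := source.toList with hs_def
    set k : Nat := (-end_idx).toNat with hk_def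
    have hk : 0 < k := by omega
    have hn : k ≤ s.length := by omega
    have he : end_idx = -(k : Int) := by omega
    rw [he, PySem.List.clampIdx_neg_natCast s.length k hk, pv_A_neg s k hk hn]
    have htoNat : ((s.length : Int) + end_idx).toNat = s.length - k := by omega
    rw [htoNat] at hnD
    have hP : ¬ ((s.drop (s.length - k)).dropWhile PySem.Chars.isspace = [] ∧
        ((s.dropWhile PySem.Chars.isspace).head? = some ':' ∧
          (s.dropWhile PySem.Chars.isspace)[1]? ≠ some '=')) :=
      fun h => hnD ⟨by omega, hlt, Or.inl h⟩
    have hQ : ¬ ((s.drop (s.length - k)).dropWhile PySem.Chars.isspace = [':'] ∧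
        s.head? = some '=') :=
      fun h => hnD ⟨by omega, hlt, Or.inr h⟩
    split_ifs with hnil hone
    · -- all-whitespace suffix: A rescans the front; ¬D forces the front test to fail, B strips to empty
      rw [pvKeyOf, pvKeyOf, hnil]
      simp only [List.head?_nil, List.getElem?_nil]
      by_cases hh : (s.dropWhile PySem.Chars.isspace).head? = some ':'
      · have h2 : (s.dropWhile PySem.Chars.isspace)[1]? = some '=' := by
          by_contra hne; exact hP ⟨hnil, hh, hne⟩
        simp [hh, h2]
      · simp [hh]
    · -- the colon is the last character: A peeks at source[0]; ¬D says source[0] ≠ '='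
      have ht := pv_neg_cases s k hk hn hnil hone
      rw [pvKeyOf, ht]
      have hh : (s.drop (s.length - 1)).head? = s[s.length - 1]? := List.head?_drop
      have h1 : (s.drop (s.length - 1))[1]? = none := by
        apply List.getElem?_eq_none
        rw [List.length_drop]; omega
      rw [hh, h1]
      by_cases hc : s[s.length - 1]? = some ':'
      · have htl : (s.drop (s.length - k)).dropWhile PySem.Chars.isspace = [':'] := by
          rw [ht]
          have hlen1 : (s.drop (s.length - 1)).length = 1 := by
            rw [List.length_drop]
            have : 1 ≤ s.length := by omega
            omega
          rcases List.length_eq_one_iff.mp hlen1 with ⟨c, hc1⟩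
          rw [hc1]
          rw [hc1, List.head?_cons] at hh
          rw [← hh] at hc
          cases hc; rfl
        have hne : ¬ (s.head? = some '=') := fun h => hQ ⟨htl, h⟩
        rw [List.head?_eq_getElem?] at hne
        simp [hc, hne]
      · simp [hc]
    · -- the loop stops at a negative index with ≥ 2 chars left: A and B read the same two cells
      rw [pvKeyOf]

theorem is_field_key_py_changed : Claim_changed_is_field_key_py := by
  unfold Claim_changed_is_field_key_py; decide

theorem is_field_key_py_tight : Claim_exact_is_field_key_py := by
  intro source end_idx _ hpre hD
  unfold Pre_is_field_key_py at hpre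
  unfold D_is_field_key_py at hD
  unfold is_field_key_py
  rw [pv_alt_eq]
  obtain ⟨-, hlt, hPQ⟩ := hD
  set s : List Char := source.toList with hs_def
  set k : Nat := (-end_idx).toNat with hk_def
  have hk : 0 < k := by omega
  have hn : k ≤ s.length := by omega
  have he : end_idx = -(k : Int) := by omega
  rw [he, PySem.List.clampIdx_neg_natCast s.length k hk, pv_A_neg s k hk hn]
  have htoNat : ((s.length : Int) + end_idx).toNat = s.length - k := by omega
  rw [htoNat] at hPQ
  rcases hPQ with ⟨hnil, hh, hne⟩ | ⟨hcol, heq⟩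
  · -- A rescans the front and answers True; B sees the empty stripped suffix and answers False
    rw [if_pos hnil, pvKeyOf, pvKeyOf, hnil]
    simp [hh, hne]
  · -- colon last, source[0] = '=': A wraps and answers False; B answers True
    have hnil : (s.drop (s.length - k)).dropWhile PySem.Chars.isspace ≠ [] := by
      rw [hcol]; simp
    have hone : ((s.drop (s.length - k)).dropWhile PySem.Chars.isspace).length = 1 := by
      rw [hcol]; rfl
    rw [if_neg hnil, if_pos hone, pvKeyOf, hcol]
    have ht := pv_neg_cases s k hk hn hnil hone
    rw [hcol] at ht
    have hc : s[s.length - 1]? = some ':' := by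
      rw [← List.head?_drop, ← ht]; rfl
    rw [List.head?_eq_getElem?] at heq
    simp [hc, heq]
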